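-- pv_equiv track=rewrite | github.com/mohammednazmy/VoiceAssist | services/api-gateway/app/core/sentry.py | _redact_params
-- ===== SOURCE A (Python) =====
-- def _redact_params(params: str) -> str:
--     """Redact sensitive query parameters."""
--     sensitive_params = ["token", "api_key", "password", "secret", "key"]
--     parts = params.split("&")
--     result = []
--     for part in parts:
--         if "=" in part:
--             key, _ = part.split("=", 1)
--             if any(s in key.lower() for s in sensitive_params):
--                 result.append(f"{key}=[REDACTED]")
--             else:
--                 result.append(part)
--         else:
--             result.append(part)
--     return "&".join(result)
-- ===== SOURCE B (Python) =====
-- def _redact_params(params: str) -> str: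
--     """Single left-to-right character scan (state machine): emit key chars as they
--     arrive; on '=' decide redaction from the accumulated key and then skip or copy
--     the value up to the next '&'; no split/join of part lists."""
--     sensitive = ("token", "api_key", "password", "secret", "key")
--     out = []
--     key = []
--     i, n = 0, len(params)
--     while i < n:
--         c = params[i]
--         i += 1
--         if c == '&':
--             out += key
--             out.append('&')
--             key = []
--         elif c == '=':
--             out += key
--             if any(s in ''.join(key).lower() for s in sensitive):
--                 out.append('=[REDACTED]')
--                 while i < n and params[i] != '&':
--                     i += 1
--             else:
--                 out.append('=')
--                 while i < n and params[i] != '&':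
--                     out.append(params[i])
--                     i += 1
--             key = []
--         else:
--             key.append(c)
--     out += key
--     return ''.join(out)
-- ===== Notes on version B (the rewrite author's own statement) =====
-- stated objective: alternative
-- what changed: Replaces A's pipeline (split on the ampersand separator, re-split each part at its first equals sign, join the rewritten parts) with a single left-to-right character scan that accumulates the current key, decides redaction when the key ends, and then skips or copies the value up to the next separator.
import Mathlib
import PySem

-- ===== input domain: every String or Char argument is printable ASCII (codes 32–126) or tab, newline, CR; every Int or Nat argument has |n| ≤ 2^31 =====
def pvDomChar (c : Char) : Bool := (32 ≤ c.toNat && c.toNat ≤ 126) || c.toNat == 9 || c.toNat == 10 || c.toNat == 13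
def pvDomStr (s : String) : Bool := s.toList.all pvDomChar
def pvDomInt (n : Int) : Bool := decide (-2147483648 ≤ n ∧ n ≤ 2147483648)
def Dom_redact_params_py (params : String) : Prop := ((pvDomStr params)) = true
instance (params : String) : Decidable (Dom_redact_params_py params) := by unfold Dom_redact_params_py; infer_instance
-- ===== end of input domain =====

-- B replaces A's split / per-part re-split / join pipeline by a single left-to-right
-- character scan that emits output as it goes (objective: alternative).

-- ===== PORT A =====
-- literal port of A: split on the separator, loop appending to result, join back;
-- exact via PySem.Chars.splitOn / splitOnMax / isIn / lower on the char list.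
def redact_params_py (params : String) : String :=
  let sensitive : List (List Char) :=
    ["token".toList, "api_key".toList, "password".toList, "secret".toList, "key".toList]
  let parts := PySem.Chars.splitOn params.toList ['&']
  let result := parts.foldl (fun res part =>
    if PySem.Chars.isIn ['='] part then
      -- key, _ = part.split("=", 1)
      let key := (PySem.Chars.splitOnMax part ['='] 1).headD []
      if sensitive.any (fun s => PySem.Chars.isIn s (PySem.Chars.lower key)) then
        res ++ [key ++ "=[REDACTED]".toList]
      else
        res ++ [part]
    else
      res ++ [part]) []
  String.mk (PySem.Chars.join ['&'] result)

-- ===== PORT B =====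
-- recursion = B's while loop: `key` is the accumulated key of the current part,
-- the inner skip/copy while-loops are dropWhile/takeWhile up to the next '&'.
def redactAltGo (cs : List Char) (key : List Char) : List Char :=
  match cs with
  | [] => key
  | c :: rest =>
    if c = '&' then key ++ '&' :: redactAltGo rest []
    else if c = '=' then
      if (["token".toList, "api_key".toList, "password".toList, "secret".toList,
           "key".toList]).any (fun s => PySem.Chars.isIn s (PySem.Chars.lower key)) then
        key ++ "=[REDACTED]".toList ++ redactAltGo (rest.dropWhile (· ≠ '&')) []
      else
        key ++ '=' :: rest.takeWhile (· ≠ '&') ++ redactAltGo (rest.dropWhile (· ≠ '&')) []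
    else redactAltGo rest (key ++ [c])
termination_by cs.length
decreasing_by
  all_goals (have := List.length_dropWhile_le (fun c => decide (c ≠ '&')) rest; simp at this ⊢; try omega)

def redact_params_py_alt (params : String) : String :=
  String.mk (redactAltGo params.toList [])

-- ===== PRECONDITION & SPEC =====
def Spec_redact_params_py (params : String) (out : String) : Prop := out = redact_params_py_alt params
instance (params : String) (out : String) : Decidable (Spec_redact_params_py params out) := by unfold Spec_redact_params_py; infer_instance

-- ===== CLAIM (what is proved, stated in full; the proofs are below) =====
def Claim_equal_redact_params_py : Prop := ∀ (params : String), Dom_redact_params_py params → Spec_redact_params_py params (redact_params_py params)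

-- ===== LEMMAS AND PROOFS =====

-- the natural structural recursion computing split-on-a-character
def segs (s : Char) : List Char → List (List Char)
  | [] => [[]]
  | c :: rest =>
    if c = s then [] :: segs s rest
    else
      match segs s rest with
      | [] => [[c]]
      | h :: t => (c :: h) :: t

lemma segs_ne_nil (s : Char) (l : List Char) : segs s l ≠ [] := by
  cases l with
  | nil => simp [segs]
  | cons c rest =>
    simp only [segs]
    split
    · simp
    · split <;> simp

-- prepend a prefix onto the head segment
def consAll (pre : List Char) : List (List Char) → List (List Char)
  | [] => [pre]
  | h :: t => (pre ++ h) :: t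

lemma consAll_nil (L : List (List Char)) (hL : L ≠ []) : consAll [] L = L := by
  cases L with
  | nil => simp at hL
  | cons h t => simp [consAll]

-- splitOn.go computes consAll of segs
lemma splitOn_go_eq (s : Char) :
    ∀ (fuel : Nat) (l cur : List Char) (acc : List (List Char)), l.length ≤ fuel →
    PySem.Chars.splitOn.go [s] fuel l cur acc = acc.reverse ++ consAll cur.reverse (segs s l) := by
  intro fuel
  induction fuel with
  | zero =>
    intro l cur acc h
    have hl : l = [] := by cases l <;> simp_all
    subst hl
    rw [PySem.Chars.splitOn.go.eq_def]
    simp [segs, consAll]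
  | succ f ih =>
    intro l cur acc h
    cases l with
    | nil =>
      rw [PySem.Chars.splitOn.go.eq_def]
      simp [segs, consAll]
    | cons c rest =>
      rw [PySem.Chars.splitOn.go.eq_def]
      simp only [List.isPrefixOf, List.length_cons, Nat.succ_le_succ_iff] at *
      obtain ⟨hh, tt, hseg⟩ : ∃ hh tt, segs s rest = hh :: tt := by
        cases hseg : segs s rest with
        | nil => exact absurd hseg (segs_ne_nil s rest)
        | cons a b => exact ⟨a, b, rfl⟩
      by_cases hc : s = c
      · subst hc
        rw [if_pos (by simp)]
        simp only [List.length_cons, List.length_nil, List.drop_succ_cons, List.drop_zero]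
        rw [ih rest [] (cur.reverse :: acc) h]
        rw [List.reverse_nil, consAll_nil _ (segs_ne_nil s rest)]
        have h2 : segs s (s :: rest) = [] :: segs s rest := by rw [segs, if_pos rfl]
        rw [h2]
        simp [consAll]
      · rw [if_neg (by simp [Ne.symm, hc])]
        rw [ih rest (c :: cur) acc h]
        have h2 : segs s (c :: rest) = (c :: hh) :: tt := by
          rw [segs, if_neg (fun e => hc e.symm), hseg]
        rw [h2, hseg]
        simp [consAll]

lemma splitOn_eq_segs (s : Char) (l : List Char) :
    PySem.Chars.splitOn l [s] = segs s l := by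
  unfold PySem.Chars.splitOn
  rw [splitOn_go_eq s (l.length + 1) l [] [] (by omega)]
  simp [consAll_nil _ (segs_ne_nil s l)]

lemma goMax0 (s : Char) (fuel : Nat) (l cur : List Char) (acc : List (List Char)) :
    PySem.Chars.splitOnMax.go [s] fuel 0 l cur acc = ((cur.reverse ++ l) :: acc).reverse := by
  cases fuel with
  | zero => rw [PySem.Chars.splitOnMax.go.eq_def]
  | succ f =>
    cases l with
    | nil => rw [PySem.Chars.splitOnMax.go.eq_def]; simp
    | cons c rest => rw [PySem.Chars.splitOnMax.go.eq_def]; simp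

lemma goMax1_head (s : Char) :
    ∀ (fuel : Nat) (l cur : List Char), l.length ≤ fuel →
    ∃ t, PySem.Chars.splitOnMax.go [s] fuel 1 l cur [] =
      (cur.reverse ++ l.takeWhile (· ≠ s)) :: t := by
  intro fuel
  induction fuel with
  | zero =>
    intro l cur h
    have hl : l = [] := by cases l <;> simp_all
    subst hl
    rw [PySem.Chars.splitOnMax.go.eq_def]
    exact ⟨[], by simp⟩
  | succ f ih =>
    intro l cur h
    cases l with
    | nil =>
      rw [PySem.Chars.splitOnMax.go.eq_def]
      exact ⟨[], by simp⟩
    | cons c rest =>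
      simp only [List.length_cons, Nat.succ_le_succ_iff] at h
      by_cases hc : s = c
      · subst hc
        refine ⟨[rest], ?_⟩
        have hstep : PySem.Chars.splitOnMax.go [s] (f + 1) 1 (s :: rest) cur [] =
            PySem.Chars.splitOnMax.go [s] f 0 rest [] [cur.reverse] := by
          rw [PySem.Chars.splitOnMax.go.eq_def]
          simp [List.isPrefixOf]
        rw [hstep, goMax0]
        simp [List.takeWhile_cons]
      · have hcs : c ≠ s := fun e => hc e.symm
        obtain ⟨t, ht⟩ := ih rest (c :: cur) h
        refine ⟨t, ?_⟩
        have hstep : PySem.Chars.splitOnMax.go [s] (f + 1) 1 (c :: rest) cur [] =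
            PySem.Chars.splitOnMax.go [s] f 1 rest (c :: cur) [] := by
          rw [PySem.Chars.splitOnMax.go.eq_def]
          simp [List.isPrefixOf, hcs, hc]
        rw [hstep, ht]
        simp [List.takeWhile_cons, hcs]

lemma splitOnMax_head (s : Char) (l : List Char) :
    (PySem.Chars.splitOnMax l [s] 1).headD [] = l.takeWhile (· ≠ s) := by
  unfold PySem.Chars.splitOnMax
  rw [if_neg (by norm_num)]
  obtain ⟨t, ht⟩ := goMax1_head s (l.length + 1) l [] (by omega)
  simp only [Int.toNat_one]
  rw [ht]
  simp

-- A's per-part function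
def partF (part : List Char) : List Char :=
  if PySem.Chars.isIn ['='] part then
    let key := (PySem.Chars.splitOnMax part ['='] 1).headD []
    if (["token".toList, "api_key".toList, "password".toList, "secret".toList,
         "key".toList]).any (fun s => PySem.Chars.isIn s (PySem.Chars.lower key)) then
      key ++ "=[REDACTED]".toList
    else part
  else part

lemma isIn_singleton (a : Char) (l : List Char) :
    PySem.Chars.isIn [a] l = true ↔ a ∈ l := by
  rw [PySem.Chars.isIn_iff_infix]
  constructor
  · intro h; exact h.mem (by simp)
  · intro h
    obtain ⟨u, v, rfl⟩ := List.append_of_mem h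
    exact ⟨u, v, by simp⟩

lemma foldl_push {α β : Type} (f : α → β) :
    ∀ (l : List α) (r0 : List β),
    l.foldl (fun res p => res ++ [f p]) r0 = r0 ++ l.map f := by
  intro l
  induction l with
  | nil => simp
  | cons a l ih => intro r0; simp [List.foldl, ih]

lemma redact_A_eq (params : String) :
    redact_params_py params =
      String.mk (PySem.Chars.join ['&'] ((segs '&' params.toList).map partF)) := by
  unfold redact_params_py
  have hfun : (fun (res : List (List Char)) part =>
      if PySem.Chars.isIn ['='] part then
        let key := (PySem.Chars.splitOnMax part ['='] 1).headD []
        if (["token".toList, "api_key".toList, "password".toList, "secret".toList,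
             "key".toList]).any (fun s => PySem.Chars.isIn s (PySem.Chars.lower key)) then
          res ++ [key ++ "=[REDACTED]".toList]
        else res ++ [part]
      else res ++ [part]) = (fun res p => res ++ [partF p]) := by
    funext res part
    simp only [partF]
    split_ifs <;> rfl
  simp only [hfun, foldl_push, List.nil_append, splitOn_eq_segs]

lemma takeWhile_key (key v : List Char) (s : Char) (h : s ∉ key) :
    (key ++ s :: v).takeWhile (· ≠ s) = key := by
  induction key with
  | nil => simp [List.takeWhile]
  | cons c k ih =>
    simp at h
    have hcs : c ≠ s := fun e => h.1 e.symm
    rw [List.cons_append, List.takeWhile_cons]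
    simp only [decide_not] at *
    simp [hcs, ih h.2]

lemma partF_nokey (p : List Char) (h : '=' ∉ p) : partF p = p := by
  unfold partF
  rw [if_neg (fun hin => h ((isIn_singleton '=' p).mp hin))]

lemma partF_withkey (key v : List Char) (h : '=' ∉ key) :
    partF (key ++ '=' :: v) =
      if (["token".toList, "api_key".toList, "password".toList, "secret".toList,
           "key".toList]).any (fun s => PySem.Chars.isIn s (PySem.Chars.lower key)) then
        key ++ "=[REDACTED]".toList
      else key ++ '=' :: v := by
  unfold partF
  rw [if_pos (by rw [isIn_singleton]; simp)]
  rw [splitOnMax_head, takeWhile_key key v '=' h]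

lemma dropWhile_mem (s : Char) (l : List Char) (h : s ∈ l) :
    ∃ r, l.dropWhile (· ≠ s) = s :: r := by
  induction l with
  | nil => simp at h
  | cons c rest ih =>
    by_cases hc : c = s
    · subst hc; exact ⟨rest, by simp [List.dropWhile_cons]⟩
    · have : s ∈ rest := by simp at h; tauto
      obtain ⟨r, hr⟩ := ih this
      refine ⟨r, ?_⟩
      rw [List.dropWhile_cons]
      simp only [decide_not] at hr
      simp [hc, hr]

lemma segs_not_mem (s : Char) (l : List Char) (h : s ∉ l) : segs s l = [l] := by
  induction l with
  | nil => simp [segs]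
  | cons c rest ih =>
    simp at h
    rw [segs, if_neg (fun e => h.1 e.symm), ih h.2]

lemma segs_append (s : Char) (seg rest : List Char) (h : s ∉ seg) :
    segs s (seg ++ s :: rest) = seg :: segs s rest := by
  induction seg with
  | nil => simp [segs]
  | cons c k ih =>
    simp at h
    rw [List.cons_append, segs, if_neg (fun e => h.1 e.symm), ih h.2]

lemma map_partF_cons (l : List Char) :
    ∃ a t, List.map partF (segs '&' l) = a :: t := by
  cases hml : List.map partF (segs '&' l) with
  | nil => exact absurd (List.map_eq_nil_iff.mp hml) (segs_ne_nil '&' l)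
  | cons a t => exact ⟨a, t, rfl⟩

lemma altGo_eq : ∀ (n : Nat) (cs key : List Char), cs.length ≤ n → '&' ∉ key → '=' ∉ key →
    redactAltGo cs key = PySem.Chars.join ['&'] (List.map partF (consAll key (segs '&' cs))) := by
  intro n
  induction n with
  | zero =>
    intro cs key h hk1 hk2
    have hnil : cs = [] := by cases cs <;> simp_all
    subst hnil
    rw [redactAltGo]
    simp [segs, consAll, partF_nokey key hk2, PySem.Chars.join_singleton]
  | succ n ih =>
    intro cs key h hk1 hk2
    cases cs with
    | nil =>
      rw [redactAltGo]
      simp [segs, consAll, partF_nokey key hk2, PySem.Chars.join_singleton]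
    | cons c rest =>
      simp only [List.length_cons, Nat.succ_le_succ_iff] at h
      rw [redactAltGo]
      by_cases hc : c = '&'
      · subst hc
        rw [if_pos rfl]
        rw [ih rest [] h (by simp) (by simp)]
        rw [consAll_nil _ (segs_ne_nil _ _)]
        have hseg : segs '&' ('&' :: rest) = [] :: segs '&' rest := by rw [segs, if_pos rfl]
        rw [hseg]
        obtain ⟨a, t, hat⟩ := map_partF_cons rest
        rw [consAll]
        simp only [List.map_cons, hat, List.append_nil]
        rw [partF_nokey key hk2, PySem.Chars.join_cons_cons]
        simp
      · rw [if_neg hc]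
        by_cases he : c = '='
        · subst he
          rw [if_pos rfl]
          by_cases hmem : '&' ∈ rest
          · obtain ⟨r, hr⟩ := dropWhile_mem '&' rest hmem
            have hrest : rest = rest.takeWhile (· ≠ '&') ++ '&' :: r := by
              conv_lhs => rw [← List.takeWhile_append_dropWhile (p := fun x => decide (x ≠ '&')) (l := rest)]
              rw [hr]
            have htw : '&' ∉ rest.takeWhile (· ≠ '&') := by
              intro hx
              have := List.mem_takeWhile_imp hx
              simp at this
            have hseg : segs '&' ('=' :: rest) = ('=' :: rest.takeWhile (· ≠ '&')) :: segs '&' r := by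
              conv_lhs => rw [hrest]
              refine segs_append '&' ('=' :: rest.takeWhile (· ≠ '&')) r ?_
              intro hx
              rcases List.mem_cons.mp hx with h1 | h1
              · exact absurd h1 (by decide)
              · exact htw h1
            have hrlen : r.length ≤ n := by
              have := congrArg List.length hrest
              simp at this
              omega
            rw [hr]
            have hgo : redactAltGo ('&' :: r) [] = '&' :: redactAltGo r [] := by
              rw [redactAltGo]
              simp
            rw [hgo, ih r [] hrlen (by simp) (by simp), consAll_nil _ (segs_ne_nil _ _)]
            rw [hseg, consAll]
            obtain ⟨a, t, hat⟩ := map_partF_cons r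
            simp only [List.map_cons, hat]
            rw [show (key ++ '=' :: rest.takeWhile (· ≠ '&')) = key ++ '=' :: rest.takeWhile (· ≠ '&') from rfl,
               partF_withkey key (rest.takeWhile (· ≠ '&')) hk2]
            split_ifs with hs
            · rw [PySem.Chars.join_cons_cons]
              simp
            · rw [PySem.Chars.join_cons_cons]
              simp
          · have htw : rest.takeWhile (· ≠ '&') = rest := by
              rw [List.takeWhile_eq_self_iff]
              intro a ha
              simp
              exact fun e => hmem (e ▸ ha)
            have hdw : rest.dropWhile (· ≠ '&') = [] := by
              rw [List.dropWhile_eq_nil_iff]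
              intro a ha
              simp
              exact fun e => hmem (e ▸ ha)
            have hseg : segs '&' ('=' :: rest) = ['=' :: rest] := by
              apply segs_not_mem
              intro hx
              rcases List.mem_cons.mp hx with h1 | h1
              · exact absurd h1 (by decide)
              · exact hmem h1
            rw [htw, hdw, hseg]
            rw [redactAltGo, consAll]
            simp only [List.map_cons, List.map_nil]
            rw [partF_withkey key rest hk2]
            split_ifs with hs <;> simp [PySem.Chars.join_singleton]
        · rw [if_neg he]
          rw [ih rest (key ++ [c]) h (by simp [hk1]; exact fun e => hc e.symm)
                (by simp [hk2]; exact fun e => he e.symm)]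
          obtain ⟨hh, tt, hseg⟩ : ∃ hh tt, segs '&' rest = hh :: tt := by
            cases hml : segs '&' rest with
            | nil => exact absurd hml (segs_ne_nil '&' rest)
            | cons a b => exact ⟨a, b, rfl⟩
          have h2 : segs '&' (c :: rest) = (c :: hh) :: tt := by
            rw [segs, if_neg hc, hseg]
          rw [h2, hseg]
          simp [consAll]

-- ===== VERDICT (by name: the statement is the Claim_ definition above) =====
theorem redact_params_py_spec : Claim_equal_redact_params_py := by
  intro params _
  unfold Spec_redact_params_py
  rw [redact_A_eq]
  unfold redact_params_py_alt
  congr 1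
  rw [altGo_eq params.toList.length params.toList [] le_rfl (by simp) (by simp)]
  rw [consAll_nil _ (segs_ne_nil _ _)]
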